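-- pv_equiv track=rewrite | github.com/eliottcassidy2000/math | 04-computation/n6_alpha_spectral_test.py | tiling_to_tournament
-- ===== SOURCE A (Python) =====
-- def tiling_to_tournament(bits, n):
--     A = [[0]*n for _ in range(n)]
--     for i in range(1, n):
--         A[i][i-1] = 1
--     tiles = []
--     for a in range(n):
--         for b in range(a):
--             if a - b >= 2:
--                 tiles.append((a, b))
--     tiles.sort()
--     for idx, (a, b) in enumerate(tiles):
--         if (bits >> idx) & 1:
--             A[b][a] = 1
--         else:
--             A[a][b] = 1
--     return A
-- ===== SOURCE B (Python) =====
-- def tiling_to_tournament(bits, n):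
--     def cell(r, c):
--         if c == r - 1:
--             return 1
--         if r - c >= 2:
--             return 0 if (bits >> ((r - 1) * (r - 2) // 2 + c)) & 1 else 1
--         if c - r >= 2:
--             return (bits >> ((c - 1) * (c - 2) // 2 + r)) & 1
--         return 0
--     return [[cell(r, c) for c in range(n)] for r in range(n)]
-- ===== Notes on version B (the rewrite author's own statement) =====
-- stated objective: simpler
-- what changed: B computes each matrix entry directly from a closed-form per-cell rule (triangular-number bit index (a-1)(a-2)//2+b), eliminating A's in-place mutation, the intermediate tiles list, its sort and the enumerate pass.
import Mathlib
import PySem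

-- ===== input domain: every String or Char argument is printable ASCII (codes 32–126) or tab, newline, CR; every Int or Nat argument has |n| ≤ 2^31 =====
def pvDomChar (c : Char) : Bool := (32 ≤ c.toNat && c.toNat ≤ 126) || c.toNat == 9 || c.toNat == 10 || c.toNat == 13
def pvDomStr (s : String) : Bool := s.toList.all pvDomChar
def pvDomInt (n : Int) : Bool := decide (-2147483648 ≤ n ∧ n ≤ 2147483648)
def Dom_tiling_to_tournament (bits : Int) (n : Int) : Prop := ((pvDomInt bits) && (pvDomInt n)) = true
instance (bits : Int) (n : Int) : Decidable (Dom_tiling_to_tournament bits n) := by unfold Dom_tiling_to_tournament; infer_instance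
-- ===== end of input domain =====

-- B replaces A's mutate-then-sort construction by a direct per-cell closed-form formula
-- (triangular-number bit index); objective: simpler (no mutation, no tiles list, no sort).

-- ===== PORT A =====
-- A[r][c] = 1  (indices here are always in range; pySetD/pyGetD are Python-exact there)
def ttSetCell (M : List (List Int)) (r c : Int) : List (List Int) :=
  PySem.List.pySetD M r (PySem.List.pySetD (PySem.List.pyGetD M r []) c 1)

def tiling_to_tournament (bits : Int) (n : Int) : List (List Int) :=
  -- A = [[0]*n for _ in range(n)]
  let A0 := (PySem.List.pyRange 0 n 1).map (fun _ => PySem.List.pyRepeat [(0 : Int)] n)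
  -- for i in range(1, n): A[i][i-1] = 1
  let A1 := (PySem.List.pyRange 1 n 1).foldl (fun M i => ttSetCell M i (i - 1)) A0
  -- tiles = []; for a in range(n): for b in range(a): if a - b >= 2: tiles.append((a, b))
  let tiles := (PySem.List.pyRange 0 n 1).foldl (fun ts a =>
    (PySem.List.pyRange 0 a 1).foldl (fun ts' b =>
      if a - b ≥ 2 then ts' ++ [(a, b)] else ts') ts) ([] : List (Int × Int))
  -- tiles.sort()  (tuples compare lexicographically)
  let tiles' := PySem.List.sorted2 tiles (fun p => p.1) (fun p => p.2)
  -- for idx, (a, b) in enumerate(tiles): if (bits >> idx) & 1: A[b][a] = 1 else: A[a][b] = 1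
  -- (idx from enumerate is ≥ 0, so `.toNat` is exact for Python's `bits >> idx`)
  (PySem.List.enumerate tiles' 0).foldl (fun M (p : Int × (Int × Int)) =>
    if PySem.Int.band (bits >>> p.1.toNat) 1 ≠ 0 then ttSetCell M p.2.2 p.2.1
    else ttSetCell M p.2.1 p.2.2) A1

-- ===== PORT B =====
-- the `cell` closure of Source B (shift amounts are ≥ 0 wherever a shift is taken, so `.toNat` is exact)
def ttCell (bits r c : Int) : Int :=
  if c = r - 1 then 1
  else if r - c ≥ 2 then
    (if PySem.Int.band (bits >>> (PySem.Int.floordiv ((r - 1) * (r - 2)) 2 + c).toNat) 1 ≠ 0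
     then 0 else 1)
  else if c - r ≥ 2 then
    PySem.Int.band (bits >>> (PySem.Int.floordiv ((c - 1) * (c - 2)) 2 + r).toNat) 1
  else 0

def tiling_to_tournament_alt (bits : Int) (n : Int) : List (List Int) :=
  (PySem.List.pyRange 0 n 1).map (fun r =>
    (PySem.List.pyRange 0 n 1).map (fun c => ttCell bits r c))

-- ===== PRECONDITION & SPEC =====
def Spec_tiling_to_tournament (bits : Int) (n : Int) (out : List (List Int)) : Prop := out = tiling_to_tournament_alt bits n
instance (bits : Int) (n : Int) (out : List (List Int)) : Decidable (Spec_tiling_to_tournament bits n out) := by unfold Spec_tiling_to_tournament; infer_instance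

-- ===== CLAIM (what is proved, stated in full; the proofs are below) =====
def Claim_equal_tiling_to_tournament : Prop := ∀ (bits : Int) (n : Int), Dom_tiling_to_tournament bits n → Spec_tiling_to_tournament bits n (tiling_to_tournament bits n)

-- ===== LEMMAS AND PROOFS =====

-- proof-side vocabulary ------------------------------------------------------

-- matrix entry (r, c), total
def ttGet (M : List (List Int)) (r c : Nat) : Int := (M.getD r []).getD c 0

-- N × N shape
def ttShape (N : Nat) (M : List (List Int)) : Prop :=
  M.length = N ∧ ∀ row ∈ M, row.length = N

-- a sequence of `A[r][c] = 1` writes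
def ttW (ws : List (Int × Int)) (M : List (List Int)) : List (List Int) :=
  ws.foldl (fun M w => ttSetCell M w.1 w.2) M

-- canonical form of A's `tiles` list
def ttTiles (n : Int) : List (Int × Int) :=
  (PySem.List.pyRange 0 n 1).flatMap (fun a =>
    (PySem.List.pyRange 0 (a - 1) 1).map (fun b => (a, b)))

-- canonical form of `enumerate(tiles)`
def ttEnum (n : Int) : List (Int × (Int × Int)) :=
  (PySem.List.pyRange 0 n 1).flatMap (fun a =>
    (PySem.List.pyRange 0 (a - 1) 1).map (fun b =>
      (PySem.Int.floordiv ((a - 1) * (a - 2)) 2 + b, (a, b))))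

-- the write a tile makes
def ttOrient (bits : Int) (p : Int × (Int × Int)) : Int × Int :=
  if PySem.Int.band (bits >>> p.1.toNat) 1 ≠ 0 then (p.2.2, p.2.1) else (p.2.1, p.2.2)

-- lexicographic order on pairs
def ttLex (p q : Int × Int) : Prop := p.1 < q.1 ∨ (p.1 = q.1 ∧ p.2 < q.2)

def ttSub (n : Int) : List (Int × Int) := (PySem.List.pyRange 1 n 1).map (fun i => (i, i - 1))

-- basic lemmas ---------------------------------------------------------------

theorem ttSetCell_eq (M : List (List Int)) (r c : Int) (hr : 0 ≤ r) (hc : 0 ≤ c) :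
    ttSetCell M r c = M.set r.toNat ((M.getD r.toNat []).set c.toNat 1) := by
  unfold ttSetCell
  rw [show r = ((r.toNat : Nat) : Int) by omega, show c = ((c.toNat : Nat) : Int) by omega]
  rw [PySem.List.pyGetD_natCast, PySem.List.pySetD_natCast, PySem.List.pySetD_natCast]
  simp [Int.toNat_of_nonneg hr, Int.toNat_of_nonneg hc]

theorem ttShape_setCell {N : Nat} {M : List (List Int)} (hM : ttShape N M)
    (a b : Int) (ha : 0 ≤ a) (hb : 0 ≤ b) (haN : a < (N : Int)) (_hbN : b < (N : Int)) :
    ttShape N (ttSetCell M a b) := by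
  obtain ⟨hlen, hrow⟩ := hM
  rw [ttSetCell_eq M a b ha hb]
  constructor
  · simp [hlen]
  · intro row hmem
    rcases List.mem_or_eq_of_mem_set hmem with h | h
    · exact hrow row h
    · subst h
      simp only [List.length_set]
      have hlt : a.toNat < M.length := by omega
      have : M.getD a.toNat [] = M[a.toNat] := by
        simp [List.getD, List.getElem?_eq_getElem hlt]
      rw [this]
      exact hrow _ (List.getElem_mem hlt)

theorem ttGet_setCell {N : Nat} {M : List (List Int)} (hM : ttShape N M)
    (a b : Int) (ha : 0 ≤ a) (hb : 0 ≤ b) (haN : a < (N : Int)) (hbN : b < (N : Int))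
    (r c : Nat) :
    ttGet (ttSetCell M a b) r c = if (r : Int) = a ∧ (c : Int) = b then 1 else ttGet M r c := by
  obtain ⟨hlen, hrow⟩ := hM
  have hlt : a.toNat < M.length := by omega
  have hMa : M.getD a.toNat [] = M[a.toNat] := by
    simp [List.getD, List.getElem?_eq_getElem hlt]
  have hblt : b.toNat < (M.getD a.toNat []).length := by
    rw [hMa, hrow _ (List.getElem_mem hlt)]; omega
  unfold ttGet
  rw [ttSetCell_eq M a b ha hb]
  by_cases hra : a.toNat = r
  · have h1 : (M.set a.toNat ((M.getD a.toNat []).set b.toNat 1)).getD r [] =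
        (M.getD a.toNat []).set b.toNat 1 := by
      subst hra; simp [List.getD, hlt]
    rw [h1]
    by_cases hcb : b.toNat = c
    · have h2 : ((M.getD a.toNat []).set b.toNat 1).getD c 0 = 1 := by
        subst hcb
        have hblt' : b.toNat < (M[a.toNat]?.getD []).length := by simpa [List.getD] using hblt
        simp [List.getD, hblt']
      rw [h2, if_pos ⟨by omega, by omega⟩]
    · have h2 : ((M.getD a.toNat []).set b.toNat 1).getD c 0 = (M.getD a.toNat []).getD c 0 := by
        simp [List.getD, hcb]
      rw [h2, if_neg, ← hra]
      rintro ⟨-, h3⟩; exact hcb (by omega)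
  · have h1 : (M.set a.toNat ((M.getD a.toNat []).set b.toNat 1)).getD r [] = M.getD r [] := by
      simp [List.getD, hra]
    rw [h1, if_neg]; rintro ⟨h2, -⟩; exact hra (by omega)

theorem ttShape_W {N : Nat} (ws : List (Int × Int)) {M : List (List Int)} (hM : ttShape N M)
    (hws : ∀ w ∈ ws, 0 ≤ w.1 ∧ w.1 < (N : Int) ∧ 0 ≤ w.2 ∧ w.2 < (N : Int)) :
    ttShape N (ttW ws M) := by
  induction ws generalizing M with
  | nil => exact hM
  | cons w ws ih =>
    obtain ⟨h1, h2, h3, h4⟩ := hws w (List.mem_cons_self)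
    exact ih (ttShape_setCell hM w.1 w.2 h1 h3 h2 h4)
      (fun v hv => hws v (List.mem_cons_of_mem _ hv))

theorem ttGet_W {N : Nat} (ws : List (Int × Int)) {M : List (List Int)} (hM : ttShape N M)
    (hws : ∀ w ∈ ws, 0 ≤ w.1 ∧ w.1 < (N : Int) ∧ 0 ≤ w.2 ∧ w.2 < (N : Int)) (r c : Nat) :
    ttGet (ttW ws M) r c = if ((r : Int), (c : Int)) ∈ ws then 1 else ttGet M r c := by
  induction ws generalizing M with
  | nil => simp [ttW]
  | cons w ws ih =>
    obtain ⟨h1, h2, h3, h4⟩ := hws w (List.mem_cons_self)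
    have step := ih (M := ttSetCell M w.1 w.2)
      (ttShape_setCell hM w.1 w.2 h1 h3 h2 h4)
      (fun v hv => hws v (List.mem_cons_of_mem _ hv))
    show ttGet (ttW ws (ttSetCell M w.1 w.2)) r c = _
    rw [step, ttGet_setCell hM w.1 w.2 h1 h3 h2 h4]
    simp only [List.mem_cons]
    by_cases hmem : ((r : Int), (c : Int)) ∈ ws
    · simp [hmem]
    · simp [hmem, Prod.ext_iff]

theorem ttA0_eq (n : Int) :
    (PySem.List.pyRange 0 n 1).map (fun _ => PySem.List.pyRepeat [(0 : Int)] n)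
      = List.replicate n.toNat (List.replicate n.toNat 0) := by
  rw [List.map_const', PySem.List.pyRepeat_singleton, PySem.List.length_pyRange_one]
  norm_num

theorem ttGet_repl (N : Nat) (r c : Nat) :
    ttGet (List.replicate N (List.replicate N (0:Int))) r c = 0 := by
  unfold ttGet
  rcases lt_or_ge r N with h | h
  · simp [List.getD, h]
  · simp [List.getD, Nat.not_lt.mpr h]

theorem ttShape_repl (N : Nat) :
    ttShape N (List.replicate N (List.replicate N (0 : Int))) := by
  unfold ttShape
  constructor
  · simp
  · intro row hrow; rw [List.eq_of_mem_replicate hrow]; simp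

theorem range_filter_lt (m j : Nat) :
    (List.range m).filter (fun k => decide (k < j)) = List.range (min m j) := by
  induction m with
  | zero => simp
  | succ m ih =>
    rw [List.range_succ, List.filter_append, ih]
    by_cases h : m < j
    · have hmin : min (m+1) j = min m j + 1 := by omega
      rw [hmin, List.range_succ]
      simp [h]
      omega
    · have h2 : min (m+1) j = min m j := by omega
      rw [h2]
      simp [h]

theorem ttFilter_eq (a : Int) :
    (PySem.List.pyRange 0 a 1).filter (fun b => decide (a - b ≥ 2)) = PySem.List.pyRange 0 (a - 1) 1 := by
  rw [PySem.List.pyRange_one 0 a, PySem.List.pyRange_one 0 (a-1), List.filter_map]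
  have hc : ∀ k ∈ List.range (a - 0).toNat,
      ((fun b => decide (a - b ≥ 2)) ∘ (fun k : Nat => (0:Int) + k)) k
        = (fun k : Nat => decide (k < (a - 1 - 0).toNat)) k := by
    intro k hk
    simp only [Function.comp_apply]
    by_cases h : (k : Int) ≤ a - 2
    · rw [decide_eq_true (show a - ((0:Int) + k) ≥ 2 by omega),
        decide_eq_true (show k < (a - 1 - 0).toNat by omega)]
    · rw [decide_eq_false (show ¬ (a - ((0:Int) + k) ≥ 2) by omega),
        decide_eq_false (show ¬ (k < (a - 1 - 0).toNat) by omega)]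
  rw [List.filter_congr hc, range_filter_lt]
  have hmin : min (a - 0).toNat ((a - 1 - 0).toNat) = (a - 1 - 0).toNat := by omega
  rw [hmin]

theorem ttTiles_eq (n : Int) :
    (PySem.List.pyRange 0 n 1).foldl (fun ts a =>
      (PySem.List.pyRange 0 a 1).foldl (fun ts' b =>
        if a - b ≥ 2 then ts' ++ [(a, b)] else ts') ts) ([] : List (Int × Int)) = ttTiles n := by
  have hbody : ∀ (ts : List (Int × Int)) (a : Int), a ∈ PySem.List.pyRange 0 n 1 →
      (PySem.List.pyRange 0 a 1).foldl (fun ts' b =>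
        if a - b ≥ 2 then ts' ++ [(a, b)] else ts') ts
      = ts ++ (PySem.List.pyRange 0 (a-1) 1).map (fun b => (a, b)) := by
    intro ts a _
    rw [PySem.List.foldl_append_ite (fun b => a - b ≥ 2) (fun b => (a, b)), ttFilter_eq]
  calc (PySem.List.pyRange 0 n 1).foldl (fun ts a =>
      (PySem.List.pyRange 0 a 1).foldl (fun ts' b =>
        if a - b ≥ 2 then ts' ++ [(a, b)] else ts') ts) ([] : List (Int × Int))
      = (PySem.List.pyRange 0 n 1).foldl (fun ts a =>
          ts ++ (PySem.List.pyRange 0 (a-1) 1).map (fun b => (a, b))) [] :=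
        PySem.List.foldl_congr_mem _ _ _ _ hbody
    _ = [] ++ (PySem.List.pyRange 0 n 1).flatMap (fun a =>
          (PySem.List.pyRange 0 (a-1) 1).map (fun b => (a, b))) :=
        PySem.List.foldl_append_eq_flatMap _ _ _
    _ = ttTiles n := by rw [List.nil_append]; rfl

theorem ttTiles_pairwise (n : Int) : (ttTiles n).Pairwise ttLex := by
  unfold ttTiles
  rw [List.pairwise_flatMap]
  constructor
  · intro a _
    refine List.Pairwise.map _ ?_ (PySem.List.pairwise_lt_pyRange_one 0 (a-1))
    intro x y hxy
    exact Or.inr ⟨rfl, hxy⟩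
  · refine List.Pairwise.imp ?_ (PySem.List.pairwise_lt_pyRange_one 0 n)
    intro a₁ a₂ h x hx y hy
    simp only [List.mem_map] at hx hy
    obtain ⟨b₁, -, rfl⟩ := hx
    obtain ⟨b₂, -, rfl⟩ := hy
    exact Or.inl h

theorem ttSorted2_aux (before : Int × Int → Int × Int → Bool)
    (hbef : ∀ p q, ttLex q p → before p q = false)
    (xs : List (Int × Int)) :
    ∀ acc, xs.Pairwise ttLex → (∀ x ∈ xs, ∀ y ∈ acc, ttLex y x) →
      xs.foldl (fun acc x => PySem.List.insertBy before x acc) acc = acc ++ xs := by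
  induction xs with
  | nil => simp
  | cons x xs ih =>
    intro acc hx h
    have h1 : PySem.List.insertBy before x acc = acc ++ [x] :=
      PySem.List.insertBy_of_forall_not_before _ _ _
        (fun y hy => hbef x y (h x List.mem_cons_self y hy))
    have h2 : ∀ z ∈ xs, ∀ y ∈ acc ++ [x], ttLex y z := by
      intro z hz y hy
      rcases List.mem_append.mp hy with hy | hy
      · exact h z (List.mem_cons_of_mem _ hz) y hy
      · rw [List.mem_singleton.mp hy]
        exact (List.pairwise_cons.mp hx).1 z hz
    rw [List.foldl_cons, h1, ih (acc ++ [x]) (List.Pairwise.of_cons hx) h2]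
    simp

theorem ttSorted2_eq_self (xs : List (Int × Int)) (hp : xs.Pairwise ttLex) :
    PySem.List.sorted2 xs (fun p => p.1) (fun p => p.2) = xs := by
  show xs.foldl (fun acc x => PySem.List.insertBy _ x acc) [] = xs
  rw [ttSorted2_aux _ ?_ xs [] hp (by simp)]
  · simp
  · intro p q hlex
    have h1 : ¬ (p.1 < q.1) := by rcases hlex with h | ⟨h1, h2⟩ <;> omega
    rcases hlex with h | ⟨ha, hb⟩
    · have h2 : q.1 < p.1 := h
      simp [h1, h2]
    · have h2 : ¬ (p.2 < q.2) := by omega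
      simp [h1, h2]

theorem ttTiles_succ (N : Nat) :
    ttTiles ((N : Int) + 1) = ttTiles (N : Int)
      ++ (PySem.List.pyRange 0 ((N : Int) - 1) 1).map (fun b => ((N : Int), b)) := by
  unfold ttTiles
  rw [PySem.List.pyRange_one_succ_right (by positivity : (0:Int) ≤ (N : Int)), List.flatMap_append]
  simp

theorem ttEnum_succ (N : Nat) :
    ttEnum ((N : Int) + 1) = ttEnum (N : Int)
      ++ (PySem.List.pyRange 0 ((N : Int) - 1) 1).map (fun b =>
        (PySem.Int.floordiv (((N : Int) - 1) * ((N : Int) - 2)) 2 + b, ((N : Int), b))) := by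
  unfold ttEnum
  rw [PySem.List.pyRange_one_succ_right (by positivity : (0:Int) ≤ (N : Int)), List.flatMap_append]
  simp

theorem ttTiles_len (N : Nat) (h : 1 ≤ N) :
    ((ttTiles (N : Int)).length : Int) = PySem.Int.floordiv (((N : Int) - 1) * ((N : Int) - 2)) 2 := by
  induction N with
  | zero => omega
  | succ N ih =>
    by_cases hN : 1 ≤ N
    · rw [show (((N+1 : Nat)) : Int) = (N : Int) + 1 by push_cast; ring]
      rw [ttTiles_succ, List.length_append, List.length_map, PySem.List.length_pyRange_one]
      have hrow : ((((N : Int) - 1 - 0).toNat : Nat) : Int) = (N : Int) - 1 := by omega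
      push_cast
      rw [hrow, ih hN]
      rw [PySem.Int.floordiv_eq_ediv_of_pos (by norm_num : (0:Int) < 2),
          PySem.Int.floordiv_eq_ediv_of_pos (by norm_num : (0:Int) < 2)]
      have hb : ((N : Int) + 1 - 1) * ((N : Int) + 1 - 2)
          = ((N : Int) - 1) * ((N : Int) - 2) + ((N : Int) - 1) * 2 := by ring
      rw [hb, Int.add_mul_ediv_right _ _ (by norm_num : (2:Int) ≠ 0)]
    · have hN0 : N = 0 := by omega
      subst hN0
      decide

theorem ttEnum_row (g : Int → Int × Int) (m s : Int) :
    PySem.List.enumerate ((PySem.List.pyRange 0 m 1).map g) s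
      = (PySem.List.pyRange 0 m 1).map (fun b => (s + b, g b)) := by
  apply List.ext_getElem?
  intro k
  rw [PySem.List.getElem?_enumerate]
  simp only [List.getElem?_map, PySem.List.getElem?_pyRange_one]
  by_cases hk : k < (m - 0).toNat
  · simp
  · simp

theorem ttEnum_eq_nat (N : Nat) :
    PySem.List.enumerate (ttTiles (N : Int)) 0 = ttEnum (N : Int) := by
  induction N with
  | zero => decide
  | succ N ih =>
    rw [show (((N+1 : Nat)) : Int) = (N : Int) + 1 by push_cast; ring]
    rw [ttTiles_succ, PySem.List.enumerate_append, ih, ttEnum_succ, ttEnum_row]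
    congr 1
    by_cases hN : 2 ≤ N
    · have hlen := ttTiles_len N (by omega)
      rw [zero_add, hlen]
    · have : PySem.List.pyRange 0 ((N : Int) - 1) 1 = [] :=
        PySem.List.pyRange_one_eq_nil (by omega)
      rw [this]
      simp

theorem ttEnum_eq (n : Int) : PySem.List.enumerate (ttTiles n) 0 = ttEnum n := by
  by_cases h : n ≤ 0
  · have h0 : PySem.List.pyRange 0 n 1 = [] := PySem.List.pyRange_one_eq_nil (by omega)
    unfold ttTiles ttEnum
    rw [h0]
    rfl
  · rw [show n = ((n.toNat : Nat) : Int) by omega]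
    exact ttEnum_eq_nat n.toNat

theorem ttBand_one_cases (x : Int) : PySem.Int.band x 1 = 0 ∨ PySem.Int.band x 1 = 1 := by
  rw [PySem.Int.band_one]
  have h1 := PySem.Int.mod_nonneg x (b := 2) (by norm_num)
  have h2 := PySem.Int.mod_lt x (b := 2) (by norm_num)
  omega


-- membership characterisations -----------------------------------------------

theorem ttSub_mem (n x y : Int) :
    ((x, y) ∈ ttSub n) ↔ (y = x - 1 ∧ 1 ≤ x ∧ x < n) := by
  unfold ttSub
  rw [List.mem_map]
  constructor
  · rintro ⟨i, hi, he⟩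
    rw [PySem.List.mem_pyRange_one] at hi
    rw [Prod.mk.injEq] at he
    omega
  · rintro ⟨h1, h2, h3⟩
    refine ⟨x, ?_, ?_⟩
    · rw [PySem.List.mem_pyRange_one]; omega
    · rw [Prod.mk.injEq]; omega

theorem ttTileW_mem (bits n x y : Int) :
    ((x, y) ∈ (ttEnum n).map (ttOrient bits)) ↔
      ((0 ≤ y ∧ y ≤ x - 2 ∧ x < n ∧
         PySem.Int.band (bits >>> (PySem.Int.floordiv ((x - 1) * (x - 2)) 2 + y).toNat) 1 = 0)
       ∨ (0 ≤ x ∧ x ≤ y - 2 ∧ y < n ∧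
         ¬ PySem.Int.band (bits >>> (PySem.Int.floordiv ((y - 1) * (y - 2)) 2 + x).toNat) 1 = 0)) := by
  constructor
  · intro h
    obtain ⟨p, hp, he⟩ := List.mem_map.mp h
    unfold ttEnum at hp
    rw [List.mem_flatMap] at hp
    obtain ⟨a, ha, hp⟩ := hp
    rw [PySem.List.mem_pyRange_one] at ha
    obtain ⟨b, hb, rfl⟩ := List.mem_map.mp hp
    rw [PySem.List.mem_pyRange_one] at hb
    unfold ttOrient at he
    dsimp only at he
    by_cases hbit : ¬ PySem.Int.band (bits >>> (PySem.Int.floordiv ((a - 1) * (a - 2)) 2 + b).toNat) 1 = 0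
    · rw [if_pos hbit] at he
      rw [Prod.mk.injEq] at he
      obtain ⟨rfl, rfl⟩ := he
      exact Or.inr ⟨by omega, by omega, by omega, hbit⟩
    · rw [if_neg hbit] at he
      rw [Prod.mk.injEq] at he
      obtain ⟨rfl, rfl⟩ := he
      rw [not_not] at hbit
      exact Or.inl ⟨by omega, by omega, by omega, hbit⟩
  · intro h
    rcases h with ⟨h1, h2, h3, h4⟩ | ⟨h1, h2, h3, h4⟩
    · refine List.mem_map.mpr
        ⟨(PySem.Int.floordiv ((x - 1) * (x - 2)) 2 + y, (x, y)), ?_, ?_⟩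
      · unfold ttEnum
        rw [List.mem_flatMap]
        refine ⟨x, ?_, List.mem_map.mpr ⟨y, ?_, rfl⟩⟩
        · rw [PySem.List.mem_pyRange_one]; omega
        · rw [PySem.List.mem_pyRange_one]; omega
      · unfold ttOrient
        rw [if_neg (not_not_intro h4)]
    · refine List.mem_map.mpr
        ⟨(PySem.Int.floordiv ((y - 1) * (y - 2)) 2 + x, (y, x)), ?_, ?_⟩
      · unfold ttEnum
        rw [List.mem_flatMap]
        refine ⟨y, ?_, List.mem_map.mpr ⟨x, ?_, rfl⟩⟩
        · rw [PySem.List.mem_pyRange_one]; omega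
        · rw [PySem.List.mem_pyRange_one]; omega
      · unfold ttOrient
        rw [if_pos h4]

theorem ttWrites_bounds (bits n : Int) :
    ∀ w ∈ ttSub n ++ (ttEnum n).map (ttOrient bits),
      0 ≤ w.1 ∧ w.1 < ((n.toNat : Nat) : Int) ∧ 0 ≤ w.2 ∧ w.2 < ((n.toNat : Nat) : Int) := by
  rintro ⟨x, y⟩ hw
  rcases List.mem_append.mp hw with hw | hw
  · rw [ttSub_mem] at hw
    refine ⟨by omega, by omega, by omega, by omega⟩
  · rw [ttTileW_mem] at hw
    rcases hw with ⟨h1, h2, h3, -⟩ | ⟨h1, h2, h3, -⟩ <;>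
      exact ⟨by omega, by omega, by omega, by omega⟩

theorem ttCell_eq_mem (bits n : Int) (r c : Nat)
    (hr : (r : Int) < n) (hc : (c : Int) < n) :
    ttCell bits r c =
      if ((r : Int), (c : Int)) ∈ ttSub n ++ (ttEnum n).map (ttOrient bits) then 1 else 0 := by
  unfold ttCell
  by_cases hc1 : (c : Int) = (r : Int) - 1
  · rw [if_pos hc1, if_pos (List.mem_append.mpr (Or.inl ((ttSub_mem n r c).mpr
      ⟨hc1, by omega, hr⟩)))]
  · rw [if_neg hc1]
    by_cases hrc : (r : Int) - (c : Int) ≥ 2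
    · rw [if_pos hrc]
      by_cases hbit : PySem.Int.band
          (bits >>> (PySem.Int.floordiv (((r : Int) - 1) * ((r : Int) - 2)) 2 + (c : Int)).toNat) 1 = 0
      · rw [if_neg (not_not_intro hbit),
          if_pos (List.mem_append.mpr (Or.inr ((ttTileW_mem bits n r c).mpr
            (Or.inl ⟨by omega, by omega, hr, hbit⟩))))]
      · rw [if_pos hbit, if_neg]
        intro hm
        rcases List.mem_append.mp hm with hm | hm
        · rw [ttSub_mem] at hm; omega
        · rw [ttTileW_mem] at hm
          rcases hm with ⟨-, -, -, h4⟩ | ⟨-, h2, -, -⟩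
          · exact hbit h4
          · omega
    · rw [if_neg hrc]
      by_cases hcr : (c : Int) - (r : Int) ≥ 2
      · rw [if_pos hcr]
        rcases ttBand_one_cases
            (bits >>> (PySem.Int.floordiv (((c : Int) - 1) * ((c : Int) - 2)) 2 + (r : Int)).toNat)
          with h0 | h1
        · rw [h0, if_neg]
          intro hm
          rcases List.mem_append.mp hm with hm | hm
          · rw [ttSub_mem] at hm; omega
          · rw [ttTileW_mem] at hm
            rcases hm with ⟨-, h2, -, -⟩ | ⟨-, -, -, h4⟩
            · omega
            · exact h4 h0
        · rw [h1, if_pos (List.mem_append.mpr (Or.inr ((ttTileW_mem bits n r c).mpr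
            (Or.inr ⟨by omega, by omega, hc, by rw [h1]; norm_num⟩))))]
      · rw [if_neg hcr, if_neg]
        intro hm
        rcases List.mem_append.mp hm with hm | hm
        · rw [ttSub_mem] at hm; omega
        · rw [ttTileW_mem] at hm
          rcases hm with ⟨-, h2, -, -⟩ | ⟨-, h2, -, -⟩ <;> omega

-- assembling the two ports ---------------------------------------------------

theorem ttGet_eq_getElem (M : List (List Int)) (i j : Nat)
    (hi : i < M.length) (hj : j < M[i].length) : ttGet M i j = M[i][j] := by
  simp [ttGet, List.getD_eq_getElem?_getD, List.getElem?_eq_getElem hi,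
    List.getElem?_eq_getElem hj]

theorem ttA_eq_W (bits n : Int) :
    tiling_to_tournament bits n =
      ttW (ttSub n ++ (ttEnum n).map (ttOrient bits))
        (List.replicate n.toNat (List.replicate n.toNat 0)) := by
  unfold tiling_to_tournament
  dsimp only
  rw [ttA0_eq n, ttTiles_eq n, ttSorted2_eq_self _ (ttTiles_pairwise n), ttEnum_eq n]
  have h1 : (PySem.List.pyRange 1 n 1).foldl (fun M i => ttSetCell M i (i - 1))
        (List.replicate n.toNat (List.replicate n.toNat 0))
      = ttW (ttSub n) (List.replicate n.toNat (List.replicate n.toNat 0)) := by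
    unfold ttW ttSub
    rw [List.foldl_map]
  rw [h1]
  have h2 : (ttEnum n).foldl (fun M (p : Int × (Int × Int)) =>
        if PySem.Int.band (bits >>> p.1.toNat) 1 ≠ 0 then ttSetCell M p.2.2 p.2.1
        else ttSetCell M p.2.1 p.2.2)
        (ttW (ttSub n) (List.replicate n.toNat (List.replicate n.toNat 0)))
      = ttW ((ttEnum n).map (ttOrient bits))
        (ttW (ttSub n) (List.replicate n.toNat (List.replicate n.toNat 0))) := by
    unfold ttW
    rw [List.foldl_map]
    refine PySem.List.foldl_congr_mem _ _ _ _ ?_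
    intro acc p _
    unfold ttOrient
    split <;> rfl
  rw [h2]
  unfold ttW
  rw [List.foldl_append]

theorem tt_main (bits n : Int) : tiling_to_tournament bits n = tiling_to_tournament_alt bits n := by
  have hb := ttWrites_bounds bits n
  have hshape : ttShape n.toNat
      (ttW (ttSub n ++ (ttEnum n).map (ttOrient bits))
        (List.replicate n.toNat (List.replicate n.toNat 0))) :=
    ttShape_W _ (ttShape_repl n.toNat) hb
  rw [ttA_eq_W]
  unfold tiling_to_tournament_alt
  apply List.ext_getElem
  · rw [hshape.1, List.length_map, PySem.List.length_pyRange_one]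
    omega
  · intro i hi1 hi2
    have hiN : i < n.toNat := by rw [hshape.1] at hi1; exact hi1
    have hin : (i : Int) < n := by omega
    apply List.ext_getElem
    · simp only [List.getElem_map, List.length_map, PySem.List.length_pyRange_one]
      rw [hshape.2 _ (List.getElem_mem hi1)]
      omega
    · intro j hj1 hj2
      have hjN : j < n.toNat := by rw [hshape.2 _ (List.getElem_mem hi1)] at hj1; exact hj1
      have hjn : (j : Int) < n := by omega
      rw [(ttGet_eq_getElem _ i j hi1 hj1).symm,
        ttGet_W _ (ttShape_repl n.toNat) hb i j, ttGet_repl]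
      simp only [List.getElem_map, PySem.List.getElem_pyRange_one, zero_add]
      rw [ttCell_eq_mem bits n i j hin hjn]

-- ===== VERDICT (by name: the statement is the Claim_ definition above) =====
theorem tiling_to_tournament_spec : Claim_equal_tiling_to_tournament := by
  intro bits n _
  exact tt_main bits n
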